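-- pv_equiv track=rewrite | github.com/rajsingh256/Bingo-Verifier | bingoPython.py | compare_nums_to_board
-- ===== SOURCE A (Python) =====
-- def compare_nums_to_board(call_nums, bingo_board):
--     player_pattern = []
--
--     for i in range(0, 5):
--         temp = []
--         for j in range(0, 5):
--             if bingo_board[i][j] in call_nums:
--                 temp.append(1)
--             else:
--                 temp.append(0)
--         player_pattern.append(temp)
--     return player_pattern
-- ===== SOURCE B (Python) =====
-- def compare_nums_to_board(call_nums, bingo_board):
--     positions = {}
--     for i in range(0, 5):
--         for j in range(0, 5):
--             positions.setdefault(bingo_board[i][j], []).append((i, j))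
--
--     player_pattern = [[0, 0, 0, 0, 0] for _ in range(0, 5)]
--     for n in call_nums:
--         for (i, j) in positions.get(n, []):
--             player_pattern[i][j] = 1
--     return player_pattern
-- ===== Notes on version B (the rewrite author's own statement) =====
-- stated objective: alternative
-- what changed: Inverted the traversal: instead of 25 membership scans of call_nums, B builds a dict from board value to its positions in one board scan and then marks cells in a single pass over call_nums.
import Mathlib
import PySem

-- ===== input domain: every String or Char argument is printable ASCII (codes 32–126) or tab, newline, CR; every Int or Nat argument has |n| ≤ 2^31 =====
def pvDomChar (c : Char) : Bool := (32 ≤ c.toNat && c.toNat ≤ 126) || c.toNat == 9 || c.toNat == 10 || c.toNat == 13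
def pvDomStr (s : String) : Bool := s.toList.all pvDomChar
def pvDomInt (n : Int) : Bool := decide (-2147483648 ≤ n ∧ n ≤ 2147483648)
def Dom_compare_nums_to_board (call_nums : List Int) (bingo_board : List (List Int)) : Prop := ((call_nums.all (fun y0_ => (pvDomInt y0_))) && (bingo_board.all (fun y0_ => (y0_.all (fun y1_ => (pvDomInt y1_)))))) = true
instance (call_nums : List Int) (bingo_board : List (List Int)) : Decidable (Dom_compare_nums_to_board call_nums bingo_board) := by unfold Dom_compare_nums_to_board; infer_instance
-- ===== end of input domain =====

-- B replaces A's 25 membership scans of call_nums by a board-value → positions dict built once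
-- and a single marking pass over call_nums (objective: alternative algorithm, fewer scans).

-- ===== PORT A =====
-- bingo_board[i][j] is read with pyGetD; inside Pre_ (board at least 5x5) the indices are in
-- range and nonnegative, where pyGetD is exact Python indexing.
def compare_nums_to_board (call_nums : List Int) (bingo_board : List (List Int)) : List (List Int) :=
  (PySem.List.pyRange 0 5 1).foldl (fun player_pattern i =>
    player_pattern ++
      [(PySem.List.pyRange 0 5 1).foldl (fun temp j =>
          if PySem.List.pyGetD (PySem.List.pyGetD bingo_board i []) j 0 ∈ call_nums then
            temp ++ [1]
          else
            temp ++ [0]) []]) []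

-- ===== PORT B =====
-- positions.setdefault(k, []).append(p) is Dict.modify k [] (· ++ [p]); the indices stored in the
-- dict are the loop counters 0..4, nonnegative and in range, where List.set/Int.toNat is exact
-- Python item assignment 'player_pattern[i][j] = 1'.
def pvSetCell (g : List (List Int)) (i j : Int) : List (List Int) :=
  g.set i.toNat ((g.getD i.toNat []).set j.toNat 1)

def compare_nums_to_board_alt (call_nums : List Int) (bingo_board : List (List Int)) : List (List Int) :=
  let positions : PySem.Dict Int (List (Int × Int)) :=
    (PySem.List.pyRange 0 5 1).foldl (fun d i =>
      (PySem.List.pyRange 0 5 1).foldl (fun d j =>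
        d.modify (PySem.List.pyGetD (PySem.List.pyGetD bingo_board i []) j 0) [] (· ++ [(i, j)])) d)
      PySem.Dict.empty
  let init : List (List Int) := (PySem.List.pyRange 0 5 1).map (fun _ => [0, 0, 0, 0, 0])
  call_nums.foldl (fun g n => (positions.getD n []).foldl (fun g p => pvSetCell g p.1 p.2) g) init

-- ===== PRECONDITION & SPEC =====
-- Pre_ excludes exactly the boards with fewer than 5 rows or a short row among the first 5,
-- on which Python A (and Python B alike) raises IndexError.
def Pre_compare_nums_to_board (call_nums : List Int) (bingo_board : List (List Int)) : Prop :=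
  5 ≤ bingo_board.length ∧ ∀ r ∈ bingo_board.take 5, 5 ≤ r.length
instance (call_nums : List Int) (bingo_board : List (List Int)) : Decidable (Pre_compare_nums_to_board call_nums bingo_board) := by unfold Pre_compare_nums_to_board; infer_instance

def pvWitness_compare_nums_to_board : List Int × List (List Int) :=
  ([3, 11, 25],
   [[1, 2, 3, 4, 5], [6, 7, 8, 9, 10], [11, 12, 13, 14, 15],
    [16, 17, 18, 19, 20], [21, 22, 23, 24, 25]])

def Spec_compare_nums_to_board (call_nums : List Int) (bingo_board : List (List Int)) (out : List (List Int)) : Prop := out = compare_nums_to_board_alt call_nums bingo_board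
instance (call_nums : List Int) (bingo_board : List (List Int)) (out : List (List Int)) : Decidable (Spec_compare_nums_to_board call_nums bingo_board out) := by unfold Spec_compare_nums_to_board; infer_instance

-- ===== CLAIM (what is proved, stated in full; the proofs are below) =====
def Claim_equal_compare_nums_to_board : Prop := ∀ (call_nums : List Int) (bingo_board : List (List Int)), Dom_compare_nums_to_board call_nums bingo_board → Pre_compare_nums_to_board call_nums bingo_board → Spec_compare_nums_to_board call_nums bingo_board (compare_nums_to_board call_nums bingo_board)

-- ===== LEMMAS AND PROOFS =====

/-- The board value at (i, j), as both ports read it. -/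
def pvBCell (bingo_board : List (List Int)) (i j : Int) : Int :=
  PySem.List.pyGetD (PySem.List.pyGetD bingo_board i []) j 0

/-- The common value of both ports: the 5x5 grid of membership indicators. -/
def pvGridFor (bingo_board : List (List Int)) (L : List Int) : List (List Int) :=
  ([0, 1, 2, 3, 4] : List Int).map (fun i =>
    ([0, 1, 2, 3, 4] : List Int).map (fun j => if pvBCell bingo_board i j ∈ L then 1 else 0))

def pvCell (g : List (List Int)) (i j : Nat) : Int := (g.getD i []).getD j 0

def pvShape5 (g : List (List Int)) : Prop := g.length = 5 ∧ ∀ r ∈ g, r.length = 5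

/-- The board cells paired with their coordinates, row-major. -/
def pvCellPairs (bingo_board : List (List Int)) : List (Int × (Int × Int)) :=
  ([0, 1, 2, 3, 4] : List Int).flatMap (fun i =>
    ([0, 1, 2, 3, 4] : List Int).map (fun j => (pvBCell bingo_board i j, (i, j))))

lemma pvA_eq (call_nums : List Int) (bingo_board : List (List Int)) :
    compare_nums_to_board call_nums bingo_board = pvGridFor bingo_board call_nums := by
  unfold compare_nums_to_board
  rw [show PySem.List.pyRange 0 5 1 = [0, 1, 2, 3, 4] from by decide]
  rw [PySem.List.foldl_append_singleton_eq_map]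
  unfold pvGridFor
  refine List.map_congr_left ?_
  intro i _
  rw [PySem.List.foldl_congr_mem _ _
      (fun temp j => temp ++ [if pvBCell bingo_board i j ∈ call_nums then 1 else 0]) _
      (by intro acc x _; unfold pvBCell; split_ifs with h <;> simp [h])]
  rw [PySem.List.foldl_append_singleton_eq_map]
  simp

lemma pvPos_getD (bingo_board : List (List Int)) (n : Int) :
    ((PySem.List.pyRange 0 5 1).foldl (fun d i =>
      (PySem.List.pyRange 0 5 1).foldl (fun d j =>
        d.modify (PySem.List.pyGetD (PySem.List.pyGetD bingo_board i []) j 0) [] (· ++ [(i, j)])) d)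
      (PySem.Dict.empty : PySem.Dict Int (List (Int × Int)))).getD n [] =
    ((pvCellPairs bingo_board).filter (fun p => p.1 == n)).map (·.2) := by
  rw [show PySem.List.pyRange 0 5 1 = [0, 1, 2, 3, 4] from by decide]
  have h : ((pvCellPairs bingo_board).foldl
      (fun d p => d.modify p.1 [] (· ++ [p.2])) (PySem.Dict.empty : PySem.Dict Int (List (Int × Int)))) =
      (([0, 1, 2, 3, 4] : List Int).foldl (fun d i =>
        (([0, 1, 2, 3, 4] : List Int)).foldl (fun d j =>
          d.modify (PySem.List.pyGetD (PySem.List.pyGetD bingo_board i []) j 0) [] (· ++ [(i, j)])) d)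
        PySem.Dict.empty) := by
    unfold pvCellPairs
    rw [List.foldl_flatMap]
    refine PySem.List.foldl_congr_mem _ _ _ _ ?_
    intro acc i _
    rw [List.foldl_map]
    simp only [pvBCell]
  rw [← h, PySem.Dict.getD_foldl_modify_append]
  simp

lemma pvShape5_gridFor (bingo_board : List (List Int)) (L : List Int) :
    pvShape5 (pvGridFor bingo_board L) := by
  refine ⟨by simp [pvGridFor], ?_⟩
  intro r hr
  simp only [pvGridFor, List.mem_map] at hr
  obtain ⟨i, _, rfl⟩ := hr
  simp

lemma pvCell_gridFor (bingo_board : List (List Int)) (L : List Int) (i j : Nat)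
    (hi : i < 5) (hj : j < 5) :
    pvCell (pvGridFor bingo_board L) i j =
      if pvBCell bingo_board (i : Int) (j : Int) ∈ L then 1 else 0 := by
  interval_cases i <;> interval_cases j <;> simp [pvCell, pvGridFor]

lemma pvSetCell_spec (g : List (List Int)) (hg : pvShape5 g) (a b : Int)
    (ha : 0 ≤ a ∧ a < 5) (hb : 0 ≤ b ∧ b < 5) :
    pvShape5 (pvSetCell g a b) ∧
    ∀ i j : Nat, i < 5 → j < 5 →
      pvCell (pvSetCell g a b) i j =
        if a = (i : Int) ∧ b = (j : Int) then 1 else pvCell g i j := by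
  obtain ⟨hlen, hrows⟩ := hg
  have haN : a.toNat < g.length := by omega
  have hrow : g.getD a.toNat [] = g[a.toNat] := by
    simp [List.getD_eq_getElem?_getD, List.getElem?_eq_getElem haN]
  have hrlen : (g.getD a.toNat []).length = 5 := by
    rw [hrow]; exact hrows _ (List.getElem_mem _)
  have hrlen' : (g[a.toNat]?.getD []).length = 5 := by
    rw [← List.getD_eq_getElem?_getD]; exact hrlen
  refine ⟨⟨by simp [pvSetCell, hlen], ?_⟩, ?_⟩
  · intro r hr
    rcases List.mem_or_eq_of_mem_set hr with h | h
    · exact hrows _ h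
    · subst h; simp [hrlen']
  · intro i j hi hj
    simp only [pvCell, pvSetCell, List.getD_eq_getElem?_getD, List.getElem?_set]
    by_cases hia : a.toNat = i
    · rw [if_pos hia, if_pos haN, Option.getD_some, List.getElem?_set]
      by_cases hjb : b.toNat = j
      · rw [if_pos hjb, if_pos (by rw [hrlen']; omega), Option.getD_some,
          if_pos ⟨by omega, by omega⟩]
      · rw [if_neg hjb, if_neg (show ¬(a = (i : Int) ∧ b = (j : Int)) by rintro ⟨_, h2⟩; omega),
          hia]
    · rw [if_neg hia, if_neg (show ¬(a = (i : Int) ∧ b = (j : Int)) by rintro ⟨h1, _⟩; omega)]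

lemma pvMark_cells (ps : List (Int × Int))
    (hps : ∀ p ∈ ps, (0 ≤ p.1 ∧ p.1 < 5) ∧ (0 ≤ p.2 ∧ p.2 < 5))
    (g : List (List Int)) (hg : pvShape5 g) :
    pvShape5 (ps.foldl (fun g p => pvSetCell g p.1 p.2) g) ∧
    ∀ i j : Nat, i < 5 → j < 5 →
      pvCell (ps.foldl (fun g p => pvSetCell g p.1 p.2) g) i j =
        if ((i : Int), (j : Int)) ∈ ps then 1 else pvCell g i j := by
  induction ps generalizing g with
  | nil => simpa using hg
  | cons p t ih =>
    obtain ⟨hp, ht⟩ := List.forall_mem_cons.mp hps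
    obtain ⟨hsh, hcell⟩ := pvSetCell_spec g hg p.1 p.2 hp.1 hp.2
    obtain ⟨hsh', hcell'⟩ := ih ht _ hsh
    refine ⟨hsh', ?_⟩
    intro i j hi hj
    rw [List.foldl_cons, hcell' i j hi hj, hcell i j hi hj]
    by_cases hmem : ((i : Int), (j : Int)) ∈ t
    · simp [hmem]
    · by_cases heq : p = ((i : Int), (j : Int))
      · subst heq; simp [hmem]
      · have : ¬ (p.1 = (i : Int) ∧ p.2 = (j : Int)) := by
          rintro ⟨h1, h2⟩; exact heq (Prod.ext h1 h2)
        simp [hmem, this, List.mem_cons, Ne.symm heq]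

lemma pvGrid_eq (bingo_board : List (List Int)) (g : List (List Int)) (L : List Int)
    (hg : pvShape5 g)
    (h : ∀ i j : Nat, i < 5 → j < 5 →
      pvCell g i j = if pvBCell bingo_board (i : Int) (j : Int) ∈ L then 1 else 0) :
    g = pvGridFor bingo_board L := by
  obtain ⟨hlen, hrows⟩ := hg
  have hglen : (pvGridFor bingo_board L).length = 5 := by simp [pvGridFor]
  apply List.ext_getElem (by omega)
  intro i h1 h2
  have hi : i < 5 := by omega
  have hrl : g[i].length = 5 := hrows _ (List.getElem_mem _)
  have hrl2 : (pvGridFor bingo_board L)[i].length = 5 := by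
    have := (pvShape5_gridFor bingo_board L).2 _ (List.getElem_mem h2)
    exact this
  apply List.ext_getElem (by omega)
  intro j h3 h4
  have hj : j < 5 := by omega
  have e1 : pvCell g i j = g[i][j] := by
    simp [pvCell, List.getD_eq_getElem?_getD, h1, h3]
  have e2 : pvCell (pvGridFor bingo_board L) i j = (pvGridFor bingo_board L)[i][j] := by
    simp only [pvCell, List.getD_eq_getElem?_getD, List.getElem?_eq_getElem h2,
      List.getElem?_eq_getElem h4, Option.getD_some]
    rfl
  calc g[i][j] = pvCell g i j := e1.symm
    _ = pvCell (pvGridFor bingo_board L) i j :=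
        (h i j hi hj).trans (pvCell_gridFor bingo_board L i j hi hj).symm
    _ = (pvGridFor bingo_board L)[i][j] := e2

lemma pvMemPos (b : List (List Int)) (n : Int) (i j : Nat) (hi : i < 5) (hj : j < 5) :
    (((i : Int), (j : Int)) ∈ ((pvCellPairs b).filter (fun p => p.1 == n)).map (·.2)) ↔
      pvBCell b (i : Int) (j : Int) = n := by
  have hmemI : ((i : Int)) ∈ ([0, 1, 2, 3, 4] : List Int) := by interval_cases i <;> simp
  have hmemJ : ((j : Int)) ∈ ([0, 1, 2, 3, 4] : List Int) := by interval_cases j <;> simp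
  simp only [pvCellPairs, List.mem_map, List.mem_filter, List.mem_flatMap]
  constructor
  · rintro ⟨p, ⟨⟨a, ha, ⟨c, hc, rfl⟩⟩, hpn⟩, hp2⟩
    simp only at hp2
    obtain ⟨rfl, rfl⟩ := Prod.mk.injEq .. ▸ hp2
    exact (beq_iff_eq).mp hpn
  · intro h
    exact ⟨(pvBCell b (i : Int) (j : Int), ((i : Int), (j : Int))),
      ⟨⟨(i : Int), hmemI, (j : Int), hmemJ, rfl⟩, by simp [h]⟩, rfl⟩

lemma pvStep (b : List (List Int)) (n : Int) (L : List Int) :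
    (((pvCellPairs b).filter (fun p => p.1 == n)).map (·.2)).foldl
      (fun g p => pvSetCell g p.1 p.2) (pvGridFor b L) = pvGridFor b (L ++ [n]) := by
  have hbounds : ∀ p ∈ ((pvCellPairs b).filter (fun p => p.1 == n)).map (·.2),
      (0 ≤ p.1 ∧ p.1 < 5) ∧ (0 ≤ p.2 ∧ p.2 < 5) := by
    intro p hp
    simp only [pvCellPairs, List.mem_map, List.mem_filter, List.mem_flatMap] at hp
    obtain ⟨q, ⟨⟨a, ha, ⟨c, hc, rfl⟩⟩, _⟩, rfl⟩ := hp
    have hr : ∀ x ∈ ([0, 1, 2, 3, 4] : List Int), 0 ≤ x ∧ x < 5 := by decide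
    exact ⟨hr a ha, hr c hc⟩
  obtain ⟨hsh, hcell⟩ := pvMark_cells _ hbounds _ (pvShape5_gridFor b L)
  apply pvGrid_eq _ _ _ hsh
  intro i j hi hj
  rw [hcell i j hi hj, pvCell_gridFor b L i j hi hj]
  by_cases hmm : pvBCell b (i : Int) (j : Int) = n
  · simp [(pvMemPos b n i j hi hj).mpr hmm, hmm]
  · have hnm := fun h => hmm ((pvMemPos b n i j hi hj).mp h)
    simp only [if_neg hnm, List.mem_append, List.mem_singleton]
    by_cases hL : pvBCell b (i : Int) (j : Int) ∈ L <;> simp [hL, hmm]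

lemma pvB_eq (call_nums : List Int) (bingo_board : List (List Int)) :
    compare_nums_to_board_alt call_nums bingo_board = pvGridFor bingo_board call_nums := by
  have hinit : (PySem.List.pyRange 0 5 1).map (fun _ => ([0, 0, 0, 0, 0] : List Int)) =
      pvGridFor bingo_board [] := by
    rw [show PySem.List.pyRange 0 5 1 = [0, 1, 2, 3, 4] from by decide]
    simp [pvGridFor]
  have hmain : ∀ (c L : List Int),
      c.foldl (fun g n => (((pvCellPairs bingo_board).filter (fun p => p.1 == n)).map (·.2)).foldl
        (fun g p => pvSetCell g p.1 p.2) g) (pvGridFor bingo_board L) =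
      pvGridFor bingo_board (L ++ c) := by
    intro c
    induction c with
    | nil => intro L; simp
    | cons n t ih =>
      intro L
      rw [List.foldl_cons, pvStep, ih (L ++ [n]), List.append_assoc, List.singleton_append]
  unfold compare_nums_to_board_alt
  simp only [hinit]
  rw [PySem.List.foldl_congr_mem _ _
    (fun g n => (((pvCellPairs bingo_board).filter (fun p => p.1 == n)).map (·.2)).foldl
      (fun g p => pvSetCell g p.1 p.2) g) _
    (by intro acc x _; rw [pvPos_getD])]
  rw [hmain call_nums [], List.nil_append]

-- ===== VERDICT (by name: the statement is the Claim_ definition above) =====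
theorem compare_nums_to_board_spec : Claim_equal_compare_nums_to_board := by
  intro call_nums bingo_board _ _
  unfold Spec_compare_nums_to_board
  rw [pvA_eq, pvB_eq]
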